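-- pv_equiv track=rewrite | github.com/Ruban-swiss/Task-6 | Task 6-9.py | find_triplet_with_sum
-- ===== SOURCE A (Python) =====
-- def find_triplet_with_sum(lst, target_sum):
--     n = len(lst)
--
--     # Iterate through each triplet combination
--     for i in range(n - 2):
--         for j in range(i + 1, n - 1):
--             for k in range(j + 1, n):
--                 triplet_sum = lst[i] + lst[j] + lst[k]
--
--                 # Check if the triplet sum is equal to the target sum
--                 if triplet_sum == target_sum:
--                     return (lst[i], lst[j], lst[k])
--
--     # If no such triplet is found, return None
--     return None
-- ===== SOURCE B (Python) =====
-- def find_triplet_with_sum(lst, target_sum):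
--     # last occurrence index of each value, built in one pass
--     last = {}
--     for idx, v in enumerate(lst):
--         last[v] = idx
--     n = len(lst)
--     for i in range(n - 1):
--         for j in range(i + 1, n):
--             need = target_sum - lst[i] - lst[j]
--             if last.get(need, -1) > j:
--                 return (lst[i], lst[j], need)
--     return None
-- ===== Notes on version B (the rewrite author's own statement) =====
-- stated objective: faster
-- what changed: Replaces the innermost k-scan by a single precomputed value->last-index dictionary: for each pair (i,j) one O(1) lookup decides whether some k>j holds the needed third value, so the triple loop becomes a double loop.
import Mathlib
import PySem

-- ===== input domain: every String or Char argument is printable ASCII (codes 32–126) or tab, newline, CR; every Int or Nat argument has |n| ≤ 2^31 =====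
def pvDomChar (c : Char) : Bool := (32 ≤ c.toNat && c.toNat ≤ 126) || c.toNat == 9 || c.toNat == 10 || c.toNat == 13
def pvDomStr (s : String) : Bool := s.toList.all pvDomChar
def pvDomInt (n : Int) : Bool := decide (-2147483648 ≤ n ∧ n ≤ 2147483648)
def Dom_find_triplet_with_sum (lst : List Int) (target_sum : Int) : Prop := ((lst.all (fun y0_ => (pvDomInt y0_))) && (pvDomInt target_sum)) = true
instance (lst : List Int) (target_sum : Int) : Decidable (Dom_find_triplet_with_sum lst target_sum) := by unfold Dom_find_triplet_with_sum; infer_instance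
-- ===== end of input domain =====

-- B replaces A's innermost k-scan by one precomputed value→last-index dictionary.

-- ===== PORT A =====
-- triple nested loop with early return; every lst[i] use is in range, so pyGetD is exact there
def find_triplet_with_sum (lst : List Int) (target_sum : Int) : Option (List Int) :=
  let n : Int := lst.length
  (PySem.List.pyRange 0 (n - 2) 1).findSome? (fun i =>
    (PySem.List.pyRange (i + 1) (n - 1) 1).findSome? (fun j =>
      (PySem.List.pyRange (j + 1) n 1).findSome? (fun k =>
        let triplet_sum := PySem.List.pyGetD lst i 0 + PySem.List.pyGetD lst j 0 + PySem.List.pyGetD lst k 0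
        if triplet_sum = target_sum then
          some [PySem.List.pyGetD lst i 0, PySem.List.pyGetD lst j 0, PySem.List.pyGetD lst k 0]
        else none)))

-- ===== PORT B =====
-- last[v] = idx for idx, v in enumerate(lst)
def pvLastDict (lst : List Int) : PySem.Dict Int Int :=
  (PySem.List.enumerate lst 0).foldl (fun d p => d.insert p.2 p.1) PySem.Dict.empty

def find_triplet_with_sum_alt (lst : List Int) (target_sum : Int) : Option (List Int) :=
  let last := pvLastDict lst
  let n : Int := lst.length
  (PySem.List.pyRange 0 (n - 1) 1).findSome? (fun i =>
    (PySem.List.pyRange (i + 1) n 1).findSome? (fun j =>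
      let need := target_sum - PySem.List.pyGetD lst i 0 - PySem.List.pyGetD lst j 0
      if last.getD need (-1) > j then
        some [PySem.List.pyGetD lst i 0, PySem.List.pyGetD lst j 0, need]
      else none))

-- ===== PRECONDITION & SPEC =====
def Spec_find_triplet_with_sum (lst : List Int) (target_sum : Int) (out : Option (List Int)) : Prop := out = find_triplet_with_sum_alt lst target_sum
instance (lst : List Int) (target_sum : Int) (out : Option (List Int)) : Decidable (Spec_find_triplet_with_sum lst target_sum out) := by unfold Spec_find_triplet_with_sum; infer_instance

-- ===== CLAIM (what is proved, stated in full; the proofs are below) =====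
def Claim_equal_find_triplet_with_sum : Prop := ∀ (lst : List Int) (target_sum : Int), Dom_find_triplet_with_sum lst target_sum → Spec_find_triplet_with_sum lst target_sum (find_triplet_with_sum lst target_sum)

-- ===== LEMMAS AND PROOFS =====

-- index of the last occurrence of v in xs (none if absent)
def pvLastOcc : List Int → Int → Option Int
  | [], _ => none
  | x :: xs, v =>
    match pvLastOcc xs v with
    | some m => some (m + 1)
    | none => if x = v then some 0 else none

theorem pvLastDict_getD_aux (xs : List Int) (v : Int) :
    ∀ (s : Int) (d : PySem.Dict Int Int),
      ((PySem.List.enumerate xs s).foldl (fun d p => d.insert p.2 p.1) d).getD v (-1) =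
        (match pvLastOcc xs v with
         | some m => s + m
         | none => d.getD v (-1)) := by
  induction xs with
  | nil => intro s d; simp [PySem.List.enumerate_nil, pvLastOcc]
  | cons x xs ih =>
    intro s d
    rw [PySem.List.enumerate_cons, List.foldl_cons, ih]
    simp only [pvLastOcc]
    cases h : pvLastOcc xs v with
    | some m => simp only []; ring
    | none =>
      simp only []
      rw [PySem.Dict.getD_insert]
      by_cases hv : x = v
      · simp [hv]
      · simp [hv, Ne.symm hv]

theorem pvLastDict_getD (lst : List Int) (v : Int) :
    (pvLastDict lst).getD v (-1) = (pvLastOcc lst v).getD (-1) := by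
  unfold pvLastDict
  rw [pvLastDict_getD_aux]
  cases h : pvLastOcc lst v with
  | some m => simp
  | none => simp [PySem.Dict.getD_empty]

theorem pvLastOcc_none (xs : List Int) (v : Int) (h : pvLastOcc xs v = none) :
    ∀ k : Nat, k < xs.length → xs.getD k 0 ≠ v := by
  induction xs with
  | nil => intro k h1; simp at h1
  | cons x xs ih =>
    simp only [pvLastOcc] at h
    cases h' : pvLastOcc xs v with
    | some m => simp [h'] at h
    | none =>
      rw [h'] at h
      simp only [] at h
      by_cases hv : x = v
      · simp [hv] at h
      · intro k h1
        cases k with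
        | zero => simpa using hv
        | succ k' =>
          rw [List.getD_cons_succ]
          exact ih h' k' (by simpa using h1)

theorem pvLastOcc_some (xs : List Int) (v m : Int) (h : pvLastOcc xs v = some m) :
    0 ≤ m ∧ m < (xs.length : Int) ∧ xs.getD m.toNat 0 = v ∧
      ∀ k : Nat, m < (k : Int) → k < xs.length → xs.getD k 0 ≠ v := by
  induction xs generalizing m with
  | nil => simp [pvLastOcc] at h
  | cons x xs ih =>
    simp only [pvLastOcc] at h
    cases h' : pvLastOcc xs v with
    | some m' =>
      rw [h'] at h
      simp only [] at h
      obtain ⟨h0, hlt, hget, hafter⟩ := ih m' h'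
      injection h with h; subst h
      refine ⟨by omega, by simp; omega, ?_, ?_⟩
      · rw [show (m' + 1).toNat = m'.toNat + 1 by omega, List.getD_cons_succ]; exact hget
      · intro k hk1 hk2
        cases k with
        | zero => omega
        | succ k' =>
          rw [List.getD_cons_succ]
          exact hafter k' (by omega) (by simpa using hk2)
    | none =>
      rw [h'] at h
      simp only [] at h
      by_cases hv : x = v
      · rw [if_pos hv] at h
        injection h with h; subst h
        refine ⟨le_refl 0, by simp, by simpa using hv, ?_⟩
        intro k hk1 hk2
        cases k with
        | zero => omega
        | succ k' =>
          rw [List.getD_cons_succ]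
          exact pvLastOcc_none xs v h' k' (by simpa using hk2)
      · rw [if_neg hv] at h; simp at h

-- the B condition "last.get(need, -1) > j" ⇔ "some index k > j holds v"  (for 0 ≤ j)
theorem pvLastOcc_gt_iff (xs : List Int) (v j : Int) (hj : 0 ≤ j) :
    ((pvLastOcc xs v).getD (-1) > j) ↔
      ∃ k : Int, j < k ∧ 0 ≤ k ∧ k < (xs.length : Int) ∧ PySem.List.pyGetD xs k 0 = v := by
  cases h : pvLastOcc xs v with
  | some m =>
    obtain ⟨h0, hlt, hget, hafter⟩ := pvLastOcc_some xs v m h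
    simp only [Option.getD_some]
    constructor
    · intro hgt
      refine ⟨m, hgt, h0, hlt, ?_⟩
      rw [show m = ((m.toNat : Int)) by omega, PySem.List.pyGetD_natCast]
      exact hget
    · rintro ⟨k, hk1, hk2, hk3, hk4⟩
      by_contra hc
      push Not at hc
      have hkm : m < k := by omega
      have := hafter k.toNat (by omega) (by omega)
      rw [show k = ((k.toNat : Int)) by omega, PySem.List.pyGetD_natCast] at hk4
      exact this hk4
  | none =>
    simp only [Option.getD_none]
    constructor
    · intro hgt; omega
    · rintro ⟨k, hk1, hk2, hk3, hk4⟩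
      have := pvLastOcc_none xs v h k.toNat (by omega)
      rw [show k = ((k.toNat : Int)) by omega, PySem.List.pyGetD_natCast] at hk4
      exact absurd hk4 this

theorem pvLastOcc_lt_len (xs : List Int) (v : Int) :
    (pvLastOcc xs v).getD (-1) < (xs.length : Int) := by
  cases h : pvLastOcc xs v with
  | some m => obtain ⟨_, h2, _, _⟩ := pvLastOcc_some xs v m h; simpa using h2
  | none => simp; omega

theorem pvFindSome?_append_none {α β : Type} (l₁ l₂ : List α) (f : α → Option β)
    (h : l₂.findSome? f = none) : (l₁ ++ l₂).findSome? f = l₁.findSome? f := by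
  rw [List.findSome?_append, h]
  cases l₁.findSome? f <;> rfl

theorem pvFindSome?_congr {α β : Type} (l : List α) (f g : α → Option β)
    (h : ∀ x ∈ l, f x = g x) : l.findSome? f = l.findSome? g := by
  induction l with
  | nil => rfl
  | cons x l ih =>
    rw [List.findSome?_cons, List.findSome?_cons, h x (List.mem_cons_self),
        ih (fun y hy => h y (List.mem_cons_of_mem _ hy))]

theorem pvFindSome?_eq_some {α β : Type} (l : List α) (f : α → Option β) (v : β)
    (hall : ∀ x ∈ l, f x = none ∨ f x = some v) (hex : ∃ x ∈ l, f x ≠ none) :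
    l.findSome? f = some v := by
  induction l with
  | nil => obtain ⟨x, hx, _⟩ := hex; simp at hx
  | cons x l ih =>
    rw [List.findSome?_cons]
    cases hfx : f x with
    | some w =>
      rcases hall x (List.mem_cons_self) with h | h
      · rw [hfx] at h; exact absurd h (by simp)
      · rw [hfx] at h; simpa [hfx] using h
    | none =>
      apply ih
      · exact fun y hy => hall y (List.mem_cons_of_mem _ hy)
      · obtain ⟨y, hy, hfy⟩ := hex
        rcases List.mem_cons.mp hy with rfl | hy'
        · exact absurd hfx hfy
        · exact ⟨y, hy', hfy⟩

-- A's innermost k-loop at (i, j) equals B's dictionary test at (i, j)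
theorem pvInner_eq (lst : List Int) (t i j : Int) (hj : 0 ≤ j) :
    (PySem.List.pyRange (j + 1) (lst.length : Int) 1).findSome? (fun k =>
        if PySem.List.pyGetD lst i 0 + PySem.List.pyGetD lst j 0 + PySem.List.pyGetD lst k 0 = t then
          some [PySem.List.pyGetD lst i 0, PySem.List.pyGetD lst j 0, PySem.List.pyGetD lst k 0]
        else none) =
      (if (pvLastDict lst).getD (t - PySem.List.pyGetD lst i 0 - PySem.List.pyGetD lst j 0) (-1) > j then
        some [PySem.List.pyGetD lst i 0, PySem.List.pyGetD lst j 0,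
              t - PySem.List.pyGetD lst i 0 - PySem.List.pyGetD lst j 0]
      else none) := by
  set ai := PySem.List.pyGetD lst i 0 with hai
  set aj := PySem.List.pyGetD lst j 0 with haj
  set need := t - ai - aj with hneed
  rw [pvLastDict_getD]
  by_cases hcond : (pvLastOcc lst need).getD (-1) > j
  · rw [if_pos hcond]
    obtain ⟨k0, hk1, hk2, hk3, hk4⟩ := (pvLastOcc_gt_iff lst need j hj).mp hcond
    apply pvFindSome?_eq_some
    · intro k _
      by_cases hs : ai + aj + PySem.List.pyGetD lst k 0 = t
      · right
        rw [if_pos hs]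
        have : PySem.List.pyGetD lst k 0 = need := by omega
        rw [this]
      · left; rw [if_neg hs]
    · refine ⟨k0, ?_, ?_⟩
      · rw [PySem.List.mem_pyRange_one]; omega
      · have hs : ai + aj + PySem.List.pyGetD lst k0 0 = t := by rw [hk4]; omega
        rw [if_pos hs]; simp
  · rw [if_neg hcond]
    rw [List.findSome?_eq_none_iff]
    intro k hk
    rw [PySem.List.mem_pyRange_one] at hk
    have hne : PySem.List.pyGetD lst k 0 ≠ need := by
      intro hc
      exact hcond ((pvLastOcc_gt_iff lst need j hj).mpr ⟨k, by omega, by omega, hk.2, hc⟩)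
    rw [if_neg (by omega)]

-- B's j = n-1 step yields none (no index exceeds n-1)
theorem pvBj_last_none (lst : List Int) (t i : Int) :
    (if (pvLastDict lst).getD (t - PySem.List.pyGetD lst i 0 -
          PySem.List.pyGetD lst ((lst.length : Int) - 1) 0) (-1) > (lst.length : Int) - 1 then
      some [PySem.List.pyGetD lst i 0, PySem.List.pyGetD lst ((lst.length : Int) - 1) 0,
            t - PySem.List.pyGetD lst i 0 - PySem.List.pyGetD lst ((lst.length : Int) - 1) 0]
    else none) = (none : Option (List Int)) := by
  rw [if_neg]
  rw [pvLastDict_getD]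
  have := pvLastOcc_lt_len lst (t - PySem.List.pyGetD lst i 0 - PySem.List.pyGetD lst ((lst.length : Int) - 1) 0)
  omega

-- B's body at a fixed i (0 ≤ i ≤ n-2) equals A's body at i
theorem pvBody_eq (lst : List Int) (t i : Int) (hi : 0 ≤ i) (hi2 : i ≤ (lst.length : Int) - 2) :
    (PySem.List.pyRange (i + 1) ((lst.length : Int) - 1) 1).findSome? (fun j =>
        (PySem.List.pyRange (j + 1) (lst.length : Int) 1).findSome? (fun k =>
          if PySem.List.pyGetD lst i 0 + PySem.List.pyGetD lst j 0 + PySem.List.pyGetD lst k 0 = t then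
            some [PySem.List.pyGetD lst i 0, PySem.List.pyGetD lst j 0, PySem.List.pyGetD lst k 0]
          else none)) =
      (PySem.List.pyRange (i + 1) (lst.length : Int) 1).findSome? (fun j =>
        if (pvLastDict lst).getD (t - PySem.List.pyGetD lst i 0 - PySem.List.pyGetD lst j 0) (-1) > j then
          some [PySem.List.pyGetD lst i 0, PySem.List.pyGetD lst j 0,
                t - PySem.List.pyGetD lst i 0 - PySem.List.pyGetD lst j 0]
        else none) := by
  have h1 : (PySem.List.pyRange ((lst.length : Int) - 1) (lst.length : Int) 1).findSome? (fun j =>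
      if (pvLastDict lst).getD (t - PySem.List.pyGetD lst i 0 - PySem.List.pyGetD lst j 0) (-1) > j then
        some [PySem.List.pyGetD lst i 0, PySem.List.pyGetD lst j 0,
              t - PySem.List.pyGetD lst i 0 - PySem.List.pyGetD lst j 0]
      else none) = none := by
    rw [List.findSome?_eq_none_iff]
    intro j hj
    rw [PySem.List.mem_pyRange_one] at hj
    have hjeq : j = (lst.length : Int) - 1 := by omega
    subst hjeq
    exact pvBj_last_none lst t i
  rw [PySem.List.pyRange_one_append (i + 1) ((lst.length : Int) - 1) (lst.length : Int)
        (by omega) (by omega),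
      pvFindSome?_append_none _ _ _ h1]
  apply pvFindSome?_congr
  intro j hj
  rw [PySem.List.mem_pyRange_one] at hj
  exact pvInner_eq lst t i j (by omega)

-- ===== VERDICT (by name: the statement is the Claim_ definition above) =====
theorem find_triplet_with_sum_spec : Claim_equal_find_triplet_with_sum := by
  intro lst t _
  unfold Spec_find_triplet_with_sum find_triplet_with_sum find_triplet_with_sum_alt
  simp only []
  by_cases hn : (lst.length : Int) ≤ 1
  · rw [PySem.List.pyRange_one_eq_nil (by omega), PySem.List.pyRange_one_eq_nil (by omega)]
    rfl
  · have h1 : (PySem.List.pyRange ((lst.length : Int) - 2) ((lst.length : Int) - 1) 1).findSome?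
        (fun i => (PySem.List.pyRange (i + 1) (lst.length : Int) 1).findSome? (fun j =>
          if (pvLastDict lst).getD (t - PySem.List.pyGetD lst i 0 - PySem.List.pyGetD lst j 0) (-1) > j then
            some [PySem.List.pyGetD lst i 0, PySem.List.pyGetD lst j 0,
                  t - PySem.List.pyGetD lst i 0 - PySem.List.pyGetD lst j 0]
          else none)) = none := by
      rw [List.findSome?_eq_none_iff]
      intro i hi
      rw [PySem.List.mem_pyRange_one] at hi
      have hieq : i = (lst.length : Int) - 2 := by omega
      subst hieq
      rw [List.findSome?_eq_none_iff]
      intro j hj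
      rw [PySem.List.mem_pyRange_one] at hj
      have hjeq : j = (lst.length : Int) - 1 := by omega
      subst hjeq
      exact pvBj_last_none lst t ((lst.length : Int) - 2)
    rw [PySem.List.pyRange_one_append 0 ((lst.length : Int) - 2) ((lst.length : Int) - 1)
          (by omega) (by omega),
        pvFindSome?_append_none _ _ _ h1]
    apply pvFindSome?_congr
    intro i hi
    rw [PySem.List.mem_pyRange_one] at hi
    exact pvBody_eq lst t i (by omega) (by omega)
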